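-- pv_equiv track=rewrite | github.com/evalstate/fast-agent | src/fast_agent/skills/manager.py | _parse_ls_remote_commit
-- ===== SOURCE A (Python) =====
-- def _parse_ls_remote_commit(output: str) -> str | None:
--     """Extract a commit hash from `git ls-remote` output.
--
--     For annotated tags, prefer the peeled commit (`refs/tags/<tag>^{}`) when present.
--     """
--     fallback: str | None = None
--     for raw_line in output.splitlines():
--         line = raw_line.strip()
--         if not line:
--             continue
--         parts = line.split(maxsplit=1)
--         commit = parts[0].strip()
--         if not commit:
--             continue
--         ref = parts[1].strip() if len(parts) > 1 else ""
--         if ref.endswith("^{}"):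
--             return commit
--         if fallback is None:
--             fallback = commit
--     return fallback
-- ===== SOURCE B (Python) =====
-- def _parse_ls_remote_commit(output: str) -> str | None:
--     """Two-phase: parse all lines into (commit, ref) entries, then select
--     the first peeled ref's commit, falling back to the first entry's commit."""
--     entries = []
--     for line in (raw.strip() for raw in output.splitlines()):
--         if line:
--             parts = line.split(maxsplit=1)
--             entries.append((parts[0], parts[1].strip() if len(parts) > 1 else ""))
--     for commit, ref in entries:
--         if ref.endswith("^{}"):
--             return commit
--     return entries[0][0] if entries else None
-- ===== Notes on version B (the rewrite author's own statement) =====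
-- stated objective: alternative
-- what changed: Replaces A's single interleaved pass (early return on a peeled ref plus a fallback accumulator, with a per-line commit re-strip and empty-commit check) by two phases: a parse pass building a list of (commit, ref) entries, then a selection pass returning the first peeled entry's commit, else the first entry's commit, else None.
import Mathlib
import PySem

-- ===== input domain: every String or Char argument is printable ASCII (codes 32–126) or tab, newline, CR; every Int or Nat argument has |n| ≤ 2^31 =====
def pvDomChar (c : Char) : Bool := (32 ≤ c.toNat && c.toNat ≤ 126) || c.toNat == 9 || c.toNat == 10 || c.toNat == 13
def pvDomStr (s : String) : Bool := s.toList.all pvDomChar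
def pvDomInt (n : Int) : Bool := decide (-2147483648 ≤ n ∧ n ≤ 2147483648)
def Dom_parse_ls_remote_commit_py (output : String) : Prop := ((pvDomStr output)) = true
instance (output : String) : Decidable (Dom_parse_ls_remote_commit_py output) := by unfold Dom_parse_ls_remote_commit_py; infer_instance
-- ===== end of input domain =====

-- B replaces A's single pass (early return + fallback accumulator) by a parse
-- phase building a (commit, ref) entry list and a separate selection phase;
-- objective: alternative decomposition, same cost.

-- ===== PORT A =====
-- the for-loop of A: early return on a peeled ref, `fallback` accumulator otherwise
def pvALoop : List String → Option String → Option String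
  | [], fallback => fallback
  | raw :: rest, fallback =>
    let line := PySem.Str.strip raw
    if line = "" then pvALoop rest fallback
    else
      -- `parts` is nonempty here (line is nonempty), so Python's parts[0] cannot raise
      let parts := PySem.Str.split₀Max line 1
      let commit := PySem.Str.strip (PySem.List.pyGetD parts 0 "")
      if commit = "" then pvALoop rest fallback
      else
        let ref := if parts.length > 1 then PySem.Str.strip (PySem.List.pyGetD parts 1 "") else ""
        if PySem.Str.endswith ref "^{}" then some commit
        else pvALoop rest (if fallback = none then some commit else fallback)

def parse_ls_remote_commit_py (output : String) : Option String :=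
  pvALoop (PySem.Str.splitlines output) none

-- ===== PORT B =====
-- phase 1 of B: parse every non-blank line into a (commit, ref) entry
def pvEntries : List String → List (String × String)
  | [] => []
  | raw :: rest =>
    let line := PySem.Str.strip raw
    if line = "" then pvEntries rest
    else
      let parts := PySem.Str.split₀Max line 1
      (PySem.List.pyGetD parts 0 "",
        if parts.length > 1 then PySem.Str.strip (PySem.List.pyGetD parts 1 "") else "") ::
        pvEntries rest

-- phase 2 of B: first entry whose ref is peeled
def pvSelect : List (String × String) → Option String
  | [] => none
  | (commit, ref) :: rest =>
    if PySem.Str.endswith ref "^{}" then some commit else pvSelect rest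

def parse_ls_remote_commit_py_alt (output : String) : Option String :=
  let entries := pvEntries (PySem.Str.splitlines output)
  match pvSelect entries with
  | some c => some c
  | none =>
    match entries with
    | [] => none
    | (c, _) :: _ => some c

-- ===== PRECONDITION & SPEC =====
def Spec_parse_ls_remote_commit_py (output : String) (out : Option String) : Prop := out = parse_ls_remote_commit_py_alt output
instance (output : String) (out : Option String) : Decidable (Spec_parse_ls_remote_commit_py output out) := by unfold Spec_parse_ls_remote_commit_py; infer_instance

-- ===== CLAIM (what is proved, stated in full; the proofs are below) =====
def Claim_equal_parse_ls_remote_commit_py : Prop := ∀ (output : String), Dom_parse_ls_remote_commit_py output → Spec_parse_ls_remote_commit_py output (parse_ls_remote_commit_py output)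

-- ===== LEMMAS AND PROOFS =====

theorem go_acc (fuel : Nat) : ∀ (m : Nat) (l : List Char) (acc : List (List Char)),
    ∃ t, PySem.Chars.split₀Max.go fuel m l acc = acc.reverse ++ t := by
  induction fuel with
  | zero => intro m l acc; exact ⟨[], by simp [PySem.Chars.split₀Max.go]⟩
  | succ fuel ih =>
    intro m l acc
    cases h : List.dropWhile PySem.Chars.isspace l with
    | nil => exact ⟨[], by simp [PySem.Chars.split₀Max.go, h]⟩
    | cons a as =>
      by_cases hm : m = 0
      · exact ⟨[a :: as], by simp [PySem.Chars.split₀Max.go, h, hm]⟩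
      · obtain ⟨t, ht⟩ := ih (m - 1) (List.dropWhile (fun c => !PySem.Chars.isspace c) (a :: as))
          (List.takeWhile (fun c => !PySem.Chars.isspace c) (a :: as) :: acc)
        refine ⟨List.takeWhile (fun c => !PySem.Chars.isspace c) (a :: as) :: t, ?_⟩
        simp [PySem.Chars.split₀Max.go, h, hm, ht]

theorem split1_head (ws : List Char) (hne : ws ≠ [])
    (hs : List.dropWhile PySem.Chars.isspace ws = ws) :
    ∃ rest, PySem.Chars.split₀Max ws 1 =
      List.takeWhile (fun c => !PySem.Chars.isspace c) ws :: rest := by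
  obtain ⟨a, as, rfl⟩ := List.exists_cons_of_ne_nil hne
  obtain ⟨t, ht⟩ := go_acc (a :: as).length 0
      (List.dropWhile (fun c => !PySem.Chars.isspace c) (a :: as))
      [List.takeWhile (fun c => !PySem.Chars.isspace c) (a :: as)]
  refine ⟨t, ?_⟩
  simp only [PySem.Chars.split₀Max]
  norm_num
  have : PySem.Chars.split₀Max.go (as.length + 1 + 1) 1 (a :: as) [] =
      PySem.Chars.split₀Max.go (a :: as).length 0
        (List.dropWhile (fun c => !PySem.Chars.isspace c) (a :: as))
        [List.takeWhile (fun c => !PySem.Chars.isspace c) (a :: as)] := by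
    simp [PySem.Chars.split₀Max.go, hs]
  rw [this, ht]; simp

theorem rstrip_prefix (v : List Char) : PySem.Chars.rstrip v <+: v := by
  have := List.dropWhile_suffix (l := v.reverse) PySem.Chars.isspace
  simpa [PySem.Chars.rstrip] using this.reverse

theorem strip_head (cs : List Char) (h : PySem.Chars.strip cs ≠ []) :
    PySem.Chars.isspace ((PySem.Chars.strip cs).head h) = false := by
  have hu : PySem.Chars.strip cs <+: PySem.Chars.lstrip cs := by
    simpa [PySem.Chars.strip] using rstrip_prefix (PySem.Chars.lstrip cs)
  have hune : PySem.Chars.lstrip cs ≠ [] := by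
    rintro he; rw [PySem.Chars.strip, he] at h; exact h (by simp [PySem.Chars.rstrip])
  rw [List.IsPrefix.head hu h]
  exact List.head_dropWhile_not PySem.Chars.isspace hune

theorem stripped_dropWhile (cs : List Char) :
    List.dropWhile PySem.Chars.isspace (PySem.Chars.strip cs) = PySem.Chars.strip cs := by
  by_cases h : PySem.Chars.strip cs = []
  · simp [h]
  · obtain ⟨a, t, he⟩ := List.exists_cons_of_ne_nil h
    have ha : PySem.Chars.isspace a = false := by
      have := strip_head cs h
      simp only [he, List.head_cons] at this
      exact this
    rw [he]
    simp [ha]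

-- the first token of a stripped nonempty line: nonempty, and strip-invariant
theorem tok_ne_nil (cs : List Char) (h : PySem.Chars.strip cs ≠ []) :
    List.takeWhile (fun c => !PySem.Chars.isspace c) (PySem.Chars.strip cs) ≠ [] := by
  obtain ⟨a, t, he⟩ := List.exists_cons_of_ne_nil h
  have ha : PySem.Chars.isspace a = false := by
    have := strip_head cs h
    simp only [he, List.head_cons] at this
    exact this
  rw [he]
  simp [ha]

theorem dropWhile_eq_self_of_all (p : Char → Bool) (l : List Char)
    (h : ∀ c ∈ l, p c = false) : List.dropWhile p l = l := by
  cases l with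
  | nil => simp
  | cons a t => simp [h a (by simp)]

theorem strip_of_all_nonspace (l : List Char) (h : ∀ c ∈ l, PySem.Chars.isspace c = false) :
    PySem.Chars.strip l = l := by
  have h1 : PySem.Chars.lstrip l = l :=
    dropWhile_eq_self_of_all _ _ h
  have h2 : PySem.Chars.rstrip l = l := by
    rw [PySem.Chars.rstrip, dropWhile_eq_self_of_all _ _ (fun c hc => h c (by simpa using hc))]
    simp
  rw [PySem.Chars.strip, h1, h2]

theorem strip_tok (cs : List Char) :
    PySem.Chars.strip (List.takeWhile (fun c => !PySem.Chars.isspace c) (PySem.Chars.strip cs)) =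
      List.takeWhile (fun c => !PySem.Chars.isspace c) (PySem.Chars.strip cs) := by
  apply strip_of_all_nonspace
  intro c hc
  simpa using List.mem_takeWhile_imp hc


-- the first token of a stripped nonempty line is itself stripped and nonempty (String level)
theorem commit_facts (raw : String) (h : PySem.Str.strip raw ≠ "") :
    PySem.Str.strip (PySem.List.pyGetD (PySem.Str.split₀Max (PySem.Str.strip raw) 1) 0 "") =
      PySem.List.pyGetD (PySem.Str.split₀Max (PySem.Str.strip raw) 1) 0 "" ∧
    PySem.List.pyGetD (PySem.Str.split₀Max (PySem.Str.strip raw) 1) 0 "" ≠ "" := by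
  have hne : PySem.Chars.strip raw.toList ≠ [] := by
    intro he
    apply h
    show String.ofList (PySem.Chars.strip raw.toList) = ""
    rw [he]
  obtain ⟨rest, hsplit⟩ := split1_head _ hne (stripped_dropWhile raw.toList)
  have hS : PySem.List.pyGetD (PySem.Str.split₀Max (PySem.Str.strip raw) 1) 0 "" =
      String.ofList
        (List.takeWhile (fun c => !PySem.Chars.isspace c) (PySem.Chars.strip raw.toList)) := by
    rw [PySem.Str.split₀Max]
    rw [show (PySem.Str.strip raw).toList = PySem.Chars.strip raw.toList from
      String.toList_ofList]
    rw [hsplit]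
    simp [PySem.List.pyGetD, PySem.List.pyGet?, PySem.List.pyIdx?]
  rw [hS]
  constructor
  · show String.ofList (PySem.Chars.strip (String.ofList _).toList) = _
    rw [String.toList_ofList, strip_tok raw.toList]
  · intro he
    exact tok_ne_nil raw.toList hne (by simpa using congrArg String.toList he)

-- A's loop equals B's select/fallback reading of the entry list, for every fallback
theorem loop_eq (lines : List String) (fb : Option String) :
    pvALoop lines fb =
      match pvSelect (pvEntries lines) with
      | some c => some c
      | none =>
        match fb with
        | some x => some x
        | none => match pvEntries lines with
                  | [] => none
                  | (c, _) :: _ => some c := by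
  induction lines generalizing fb with
  | nil => cases fb <;> rfl
  | cons raw rest ih =>
    by_cases hl : PySem.Str.strip raw = ""
    · simp only [pvALoop, pvEntries, if_pos hl]
      exact ih fb
    · obtain ⟨hstrip, hne⟩ := commit_facts raw hl
      simp only [pvALoop, pvEntries, if_neg hl, hstrip, if_neg hne]
      by_cases hp : PySem.Str.endswith
          (if (PySem.Str.split₀Max (PySem.Str.strip raw) 1).length > 1 then
            PySem.Str.strip (PySem.List.pyGetD (PySem.Str.split₀Max (PySem.Str.strip raw) 1) 1 "")
          else "") "^{}" = true
      · simp only [pvSelect, if_pos hp]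
      · simp only [pvSelect, if_neg hp, ih]
        cases fb <;> rfl

-- ===== VERDICT (by name: the statement is the Claim_ definition above) =====
theorem parse_ls_remote_commit_py_spec : Claim_equal_parse_ls_remote_commit_py := by
  intro output _
  unfold Spec_parse_ls_remote_commit_py parse_ls_remote_commit_py parse_ls_remote_commit_py_alt
  rw [loop_eq]
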